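-- pv_equiv track=rewrite | github.com/AcBurggg/chacha20_circuitSim | IO/hex_generator.py | text_to_hex_blocks
-- ===== SOURCE A (Python) =====
-- def text_to_hex_blocks(text):
--     output_lines = []
--     i = 0
--     while i < len(text):
--         chunk = text[i:i+4]  # Only 4 characters = 8 hex characters
--         hex_chunk = ''.join([f"{ord(c):02x}" for c in chunk])
--         if len(chunk) < 4:
--             pad_length = 4 - len(chunk)
--             hex_chunk += '00' * pad_length
--         output_lines.append(hex_chunk)
--         i += 4
--     return '\n'.join(output_lines)
-- ===== SOURCE B (Python) =====
-- def text_to_hex_blocks(text):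
--     h = ''.join(f"{ord(c):02x}" for c in text)
--     h += '0' * (-len(h) % 8)
--     return '\n'.join(h[8 * i:8 * i + 8] for i in range(len(h) // 8))
-- ===== Notes on version B (the rewrite author's own statement) =====
-- stated objective: alternative
-- what changed: B converts the whole text to one hex string in a single pass, right-pads it with zero digits to a multiple of 8, and then chunks that string into 8-char lines, instead of A's chunk-text-by-4-then-convert-and-pad-each-chunk loop.
import Mathlib
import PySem

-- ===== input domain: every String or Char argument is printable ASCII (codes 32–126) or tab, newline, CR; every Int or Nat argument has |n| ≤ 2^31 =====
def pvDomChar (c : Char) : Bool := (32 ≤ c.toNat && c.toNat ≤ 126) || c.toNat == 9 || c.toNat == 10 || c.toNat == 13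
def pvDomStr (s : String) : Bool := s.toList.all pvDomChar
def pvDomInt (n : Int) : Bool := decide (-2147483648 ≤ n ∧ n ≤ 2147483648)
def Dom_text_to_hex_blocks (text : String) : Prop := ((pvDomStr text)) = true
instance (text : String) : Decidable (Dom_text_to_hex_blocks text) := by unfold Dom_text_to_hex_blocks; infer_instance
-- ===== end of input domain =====

-- B converts the whole text to one hex string in a single pass, pads once to a multiple
-- of 8, and chunks that string into 8-char lines (convert-then-chunk instead of A's
-- chunk-then-convert loop); same asymptotic cost, different decomposition.

-- ===== PORT A =====

-- hex digit character for n < 16 (lowercase, as Python's 'x' format)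
def hexDig (n : Nat) : Char := if n < 10 then Char.ofNat (48 + n) else Char.ofNat (87 + n)

-- hex digits of n, most significant first; exact for n ≥ 0 (ord(c) is never negative)
def hexChars (n : Nat) : List Char :=
  if n < 16 then [hexDig n] else hexChars (n / 16) ++ [hexDig (n % 16)]
  decreasing_by exact Nat.div_lt_self (by omega) (by omega)

-- exact port of f"{n:02x}" for n ≥ 0: hex digits left-padded with '0' to width 2
def fmt02x (n : Nat) : List Char :=
  List.replicate (2 - (hexChars n).length) '0' ++ hexChars n

-- the while-loop of A: take text[i:i+4], hex it, pad short chunks with '00' each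
def aLoop : List Char → List (List Char)
  | [] => []
  | c :: rest =>
      let chunk := List.take 4 (c :: rest)
      let hexChunk := PySem.Chars.join [] (chunk.map (fun ch => fmt02x ch.toNat))
      let hexChunk :=
        if chunk.length < 4 then
          hexChunk ++ (List.replicate (4 - chunk.length) ['0', '0']).flatten
        else hexChunk
      hexChunk :: aLoop (List.drop 3 rest)
  termination_by l => l.length
  decreasing_by simp

def text_to_hex_blocks (text : String) : String :=
  String.ofList (PySem.Chars.join ['\n'] (aLoop text.toList))

-- ===== PORT B =====

def text_to_hex_blocks_alt (text : String) : String :=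
  let h := PySem.Chars.join [] (text.toList.map (fun c => fmt02x c.toNat))
  let h := h ++ List.replicate (PySem.Int.mod (-(h.length : Int)) 8).toNat '0'
  String.ofList (PySem.Chars.join ['\n']
    ((List.range (h.length / 8)).map
      (fun (i : Nat) => PySem.List.slice h (some (8 * (i : Int))) (some (8 * (i : Int) + 8)))))

-- ===== PRECONDITION & SPEC =====
def Spec_text_to_hex_blocks (text : String) (out : String) : Prop := out = text_to_hex_blocks_alt text
instance (text : String) (out : String) : Decidable (Spec_text_to_hex_blocks text out) := by unfold Spec_text_to_hex_blocks; infer_instance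

-- ===== CLAIM (what is proved, stated in full; the proofs are below) =====
def Claim_equal_text_to_hex_blocks : Prop := ∀ (text : String), Dom_text_to_hex_blocks text → Spec_text_to_hex_blocks text (text_to_hex_blocks text)

-- ===== LEMMAS AND PROOFS =====

-- joining with the empty separator is concatenation
theorem join_nil_sep : ∀ (ps : List (List Char)), PySem.Chars.join [] ps = ps.flatten := by
  intro ps
  induction ps with
  | nil => rfl
  | cons p ps ih =>
      cases ps with
      | nil => simp [PySem.Chars.join, List.intercalate]
      | cons q qs =>
          simp only [PySem.Chars.join, List.intercalate, List.intersperse] at *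
          simp [ih]

-- the hex string of the whole text, as a char list
def hexAll (cs : List Char) : List Char := (cs.map (fun c => fmt02x c.toNat)).flatten

-- proof-side normal form: split a char list into consecutive 8-char groups
def chunks8 : List Char → List (List Char)
  | [] => []
  | c :: rest => List.take 8 (c :: rest) :: chunks8 (List.drop 7 rest)
  termination_by l => l.length
  decreasing_by simp

theorem chunks8_nil : chunks8 [] = [] := by rw [chunks8.eq_def]

theorem chunks8_cons (c : Char) (rest : List Char) :
    chunks8 (c :: rest) = List.take 8 (c :: rest) :: chunks8 (List.drop 7 rest) := by
  rw [chunks8.eq_def]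

theorem chunks8_ne_nil (l : List Char) (h : l ≠ []) :
    chunks8 l = List.take 8 l :: chunks8 (List.drop 8 l) := by
  cases l with
  | nil => exact absurd rfl h
  | cons c rest => rw [chunks8_cons]; simp

theorem aLoop_nil : aLoop [] = [] := by rw [aLoop.eq_def]

theorem aLoop_cons (c : Char) (rest : List Char) :
    aLoop (c :: rest) =
      (if (List.take 4 (c :: rest)).length < 4 then
          PySem.Chars.join [] ((List.take 4 (c :: rest)).map (fun ch => fmt02x ch.toNat)) ++
            (List.replicate (4 - (List.take 4 (c :: rest)).length) ['0', '0']).flatten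
        else
          PySem.Chars.join [] ((List.take 4 (c :: rest)).map (fun ch => fmt02x ch.toNat)))
        :: aLoop (List.drop 3 rest) := by
  rw [aLoop.eq_def]

theorem length_fmt02x (n : Nat) (h : n < 256) : (fmt02x n).length = 2 := by
  unfold fmt02x
  by_cases h16 : n < 16
  · rw [hexChars]; simp [h16]
  · rw [hexChars]; simp only [h16]
    rw [hexChars]
    have : n / 16 < 16 := by omega
    simp [this]

theorem length_hexAll (cs : List Char) (h : ∀ c ∈ cs, c.toNat < 256) :
    (hexAll cs).length = 2 * cs.length := by
  induction cs with
  | nil => rfl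
  | cons c rest ih =>
      simp only [hexAll, List.map_cons, List.flatten_cons, List.length_append, List.length_cons]
      rw [length_fmt02x c.toNat (h c (by simp))]
      have := ih (fun x hx => h x (by simp [hx]))
      simp only [hexAll] at this
      omega

theorem hexAll_append (l1 l2 : List Char) : hexAll (l1 ++ l2) = hexAll l1 ++ hexAll l2 := by
  simp [hexAll]

theorem chunks8_append8 (l1 l2 : List Char) (h : l1.length = 8) :
    chunks8 (l1 ++ l2) = l1 :: chunks8 l2 := by
  rw [chunks8_ne_nil (l1 ++ l2) (by intro hc; have h2 := congrArg List.length hc; rw [List.length_append, h] at h2; simp at h2)]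
  have ht : (8 : Nat) ≤ l1.length := by omega
  rw [List.take_append_of_le_length ht, List.drop_append_of_le_length ht]
  rw [List.take_of_length_le (by omega), List.drop_of_length_le (by omega)]
  simp

theorem chunks8_of_length_eight (l : List Char) (h : l.length = 8) : chunks8 l = [l] := by
  have := chunks8_append8 l [] h
  simpa [chunks8_nil] using this

theorem flatten_replicate_pair (k : Nat) :
    (List.replicate k (['0', '0'] : List Char)).flatten = List.replicate (2 * k) '0' := by
  induction k with
  | zero => rfl
  | succ m ih =>
      rw [List.replicate_succ, List.flatten_cons, ih]
      have : 2 * (m + 1) = 2 + 2 * m := by omega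
      rw [this, List.replicate_add]
      rfl

-- B's group list, in drop/take form, equals chunks8 on lists of length 8*k
theorem range_chunks (k : Nat) : ∀ (l : List Char), l.length = 8 * k →
    (List.range k).map (fun i => (l.drop (8 * i)).take 8) = chunks8 l := by
  induction k with
  | zero =>
      intro l hl
      have : l = [] := List.eq_nil_of_length_eq_zero (by omega)
      simp [this, chunks8_nil]
  | succ m ih =>
      intro l hl
      rw [List.range_succ_eq_map, chunks8_ne_nil l (by intro hc; simp [hc] at hl)]
      simp only [List.map_cons, List.map_map, Nat.mul_zero, List.drop_zero]
      congr 1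
      rw [← ih (l.drop 8) (by simp [hl]; omega)]
      apply List.map_congr_left
      intro i _
      simp only [Function.comp_apply, List.drop_drop]
      congr 2
      omega

-- the main list-level equivalence, following A's loop structure
theorem main_lemma : ∀ (cs : List Char), (∀ c ∈ cs, c.toNat < 256) →
    chunks8 (hexAll cs ++ List.replicate ((8 - (hexAll cs).length % 8) % 8) '0') = aLoop cs := by
  intro cs
  induction cs using aLoop.induct with
  | case1 => intro _; simp [hexAll, chunks8_nil, aLoop_nil]
  | case2 c rest ih =>
      intro hdom
      rw [aLoop_cons]
      have hsplit : c :: rest = List.take 4 (c :: rest) ++ List.drop 3 rest := by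
        simp
      by_cases hlen : rest.length < 3
      · -- short final chunk: take 4 is everything
        have htake : List.take 4 (c :: rest) = c :: rest := List.take_of_length_le (by simp; omega)
        have hdrop : List.drop 3 rest = [] := List.drop_of_length_le (by omega)
        rw [htake, hdrop, aLoop_nil]
        have hl : (hexAll (c :: rest)).length = 2 * (rest.length + 1) :=
          by simpa using length_hexAll (c :: rest) hdom
        rw [if_pos (by simp; omega)]
        rw [join_nil_sep, flatten_replicate_pair]
        have h1 : (8 - (hexAll (c :: rest)).length % 8) % 8 = 2 * (4 - (c :: rest).length) := by
          simp only [hl, List.length_cons]; omega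
        rw [h1]
        apply chunks8_of_length_eight
        simp [hl]
        omega
      · -- full 4-char chunk
        have htake4 : (List.take 4 (c :: rest)).length = 4 := by simp; omega
        rw [if_neg (by omega)]
        have hmem4 : ∀ x ∈ List.take 4 (c :: rest), x.toNat < 256 :=
          fun x hx => hdom x (List.mem_of_mem_take hx)
        have hmemr : ∀ x ∈ List.drop 3 rest, x.toNat < 256 :=
          fun x hx => hdom x (by rw [hsplit]; exact List.mem_append_right _ hx)
        have hl4 : (hexAll (List.take 4 (c :: rest))).length = 8 := by
          rw [length_hexAll _ hmem4, htake4]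
        have hsum : hexAll (c :: rest) = hexAll (List.take 4 (c :: rest)) ++ hexAll (List.drop 3 rest) := by
          conv_lhs => rw [hsplit]
          exact hexAll_append _ _
        have hmod : (8 - (hexAll (c :: rest)).length % 8) % 8
            = (8 - (hexAll (List.drop 3 rest)).length % 8) % 8 := by
          rw [hsum, List.length_append, hl4]; omega
        rw [hmod, hsum, List.append_assoc, chunks8_append8 _ _ hl4, ih hmemr, join_nil_sep]
        rfl

theorem pad_toNat (n : Nat) : (PySem.Int.mod (-(n : Int)) 8).toNat = (8 - n % 8) % 8 := by
  rw [PySem.Int.mod_eq_emod_of_pos (by norm_num : (0 : Int) < 8)]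
  omega

-- ===== VERDICT (by name: the statement is the Claim_ definition above) =====
theorem text_to_hex_blocks_spec : Claim_equal_text_to_hex_blocks := by
  intro text hdom
  unfold Spec_text_to_hex_blocks text_to_hex_blocks text_to_hex_blocks_alt
  have hdom' : ∀ c ∈ text.toList, c.toNat < 256 := by
    intro c hc
    have := List.all_eq_true.mp hdom c hc
    unfold pvDomChar at this
    simp at this
    omega
  simp only [join_nil_sep, pad_toNat]
  congr 1
  congr 1
  symm
  show (List.range ((hexAll text.toList ++
        List.replicate ((8 - (hexAll text.toList).length % 8) % 8) '0').length / 8)).map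
      (fun (i : Nat) => PySem.List.slice
        (hexAll text.toList ++ List.replicate ((8 - (hexAll text.toList).length % 8) % 8) '0')
        (some (8 * (i : Int))) (some (8 * (i : Int) + 8)))
      = aLoop text.toList
  set hp := hexAll text.toList ++
      List.replicate ((8 - (hexAll text.toList).length % 8) % 8) '0' with hhp
  have hlen : hp.length = 8 * (hp.length / 8) := by
    simp only [hhp, List.length_append, List.length_replicate]
    omega
  rw [← main_lemma text.toList hdom', ← hhp, ← range_chunks (hp.length / 8) hp hlen]
  apply List.map_congr_left
  intro i _
  have h := PySem.List.slice_natCast_add hp (8 * i) 8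
  push_cast at h ⊢
  exact h
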